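-- pv_equiv track=rewrite | github.com/Anpatel95/Python | Python Fundamentals/Program_poem_mixer/Program_poem_mixer/Program_poem_mixer.py | word_mixer
-- ===== SOURCE A (Python) =====
-- def word_mixer(word_lista):
--     word_lista.sort()
--     new_words = []
--     while len(word_lista) > 5:
--         #pop the word 5th from the end of the list and append to the new list
--         new_words.append(word_lista.pop(-5))
--         #pop the first word in the list and append to the new list
--         new_words.append(word_lista.pop(0))
--         #pop the last word in the list and append to the new list
--         new_words.append(word_lista.pop(-1))
--
--     return new_words
-- ===== SOURCE B (Python) =====
-- # O(n log n) re-implementation: sort once, then simulate the pops with two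
-- # index pointers into the sorted array plus a small buffer holding the current
-- # last (at most 5) elements, so no O(n) list pops are needed.
-- # Note: A sorts and empties its argument in place; B leaves it untouched
-- # (equivalence is about the return value).
-- def word_mixer(word_lista):
--     words = sorted(word_lista)
--     new_words = []
--     lo, hi = 0, len(words)
--     tail = []  # the current last len(tail) (<= 5) remaining elements, in order
--     while (hi - lo) + len(tail) > 5:
--         while len(tail) < 5:
--             hi -= 1
--             tail.insert(0, words[hi])
--         new_words.append(tail.pop(0))   # 5th from the end
--         new_words.append(words[lo])     # first
--         lo += 1
--         new_words.append(tail.pop())    # last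
--     return new_words
-- ===== Notes on version B (the rewrite author's own statement) =====
-- stated objective: faster
-- what changed: Instead of repeatedly popping pop(-5)/pop(0)/pop(-1) from a shrinking list (each pop(0)/pop(-5) shifts O(n) elements), B sorts once and simulates the pops with two index pointers into the sorted array plus a <=5-element buffer for the back, so each round is O(1) after the sort.
import Mathlib
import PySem

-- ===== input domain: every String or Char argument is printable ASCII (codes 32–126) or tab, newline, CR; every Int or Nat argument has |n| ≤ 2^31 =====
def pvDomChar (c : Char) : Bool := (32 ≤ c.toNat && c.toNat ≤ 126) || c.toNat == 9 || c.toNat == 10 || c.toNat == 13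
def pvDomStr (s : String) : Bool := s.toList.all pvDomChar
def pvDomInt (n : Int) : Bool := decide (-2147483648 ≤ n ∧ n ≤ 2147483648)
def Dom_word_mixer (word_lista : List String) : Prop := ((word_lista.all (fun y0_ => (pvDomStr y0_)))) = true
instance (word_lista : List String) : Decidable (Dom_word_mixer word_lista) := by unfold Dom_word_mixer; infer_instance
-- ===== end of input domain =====

-- B replaces A's repeated O(n) list pops by index pointers into the sorted array plus a ≤5-element
-- buffer for the back of the list. Note: A sorts and empties its argument in place, B leaves it
-- untouched — the equivalence proved here is about the return value only.

-- ===== PORT A =====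
-- A's while loop: pop(-5), pop(0), pop(-1), appending each popped word to new_words (acc)
def wmLoopA (cur acc : List String) : List String :=
  if 5 < cur.length then
    match h5 : PySem.List.pop? cur (-5) with
    | none => acc          -- unreachable (pop of a list of length > 5 cannot fail)
    | some (a, c1) =>
      match h0 : PySem.List.pop? c1 0 with
      | none => acc ++ [a]
      | some (b, c2) =>
        match h1 : PySem.List.pop? c2 (-1) with
        | none => acc ++ [a] ++ [b]
        | some (c, c3) => wmLoopA c3 (acc ++ [a] ++ [b] ++ [c])
  else acc
termination_by cur.length
decreasing_by
  have e5 := PySem.List.length_of_pop?_eq_some _ h5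
  have e0 := PySem.List.length_of_pop?_eq_some _ h0
  have e1 := PySem.List.length_of_pop?_eq_some _ h1
  simp at e5 e0 e1
  omega

def word_mixer (word_lista : List String) : List String :=
  wmLoopA (PySem.List.sorted word_lista (fun x => x) false) []

-- ===== PORT B =====
-- B's inner while: refill tail to 5 elements from the back of the untouched middle words[lo:hi].
-- The '0 < hi' conjunct only makes the recursion total; B never reaches hi = 0 here.
def wmRefill (words : List String) (hi : Nat) (tail : List String) : Nat × List String :=
  if tail.length < 5 ∧ 0 < hi then
    wmRefill words (hi - 1) (words.getD (hi - 1) "" :: tail)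
  else (hi, tail)
termination_by 5 - tail.length
decreasing_by simp; omega

-- needed by wmLoopB's termination (cited in its decreasing_by)
theorem wmRefill_sum (words : List String) (hi : Nat) (tail : List String) :
    (wmRefill words hi tail).1 + (wmRefill words hi tail).2.length = hi + tail.length := by
  fun_induction wmRefill words hi tail with
  | case1 hi tail h ih => simp at ih ⊢; omega
  | case2 hi tail h => simp

-- B's outer while: words[lo] is the current first element, tail the current last ≤5 elements
def wmLoopB (words : List String) (lo hi : Nat) (tail acc : List String) : List String :=
  if 5 < (hi - lo) + tail.length then
    match hr : wmRefill words hi tail with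
    | (hi', tail') =>
      match tail' with
      | [] => acc          -- unreachable: tail' has 5 elements here
      | t0 :: trest =>
        wmLoopB words (lo + 1) hi' trest.dropLast
          (acc ++ [t0] ++ [words.getD lo ""] ++ [trest.getLastD ""])
  else acc
termination_by hi + tail.length
decreasing_by
  have hs := wmRefill_sum words hi tail
  rw [hr] at hs
  simp at hs
  have := trest.length_dropLast
  omega

def word_mixer_alt (word_lista : List String) : List String :=
  wmLoopB (PySem.List.sorted word_lista (fun x => x) false) 0
    (PySem.List.sorted word_lista (fun x => x) false).length [] []

-- ===== PRECONDITION & SPEC =====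
def Spec_word_mixer (word_lista : List String) (out : List String) : Prop := out = word_mixer_alt word_lista
instance (word_lista : List String) (out : List String) : Decidable (Spec_word_mixer word_lista out) := by unfold Spec_word_mixer; infer_instance

-- ===== CLAIM (what is proved, stated in full; the proofs are below) =====
def Claim_equal_word_mixer : Prop := ∀ (word_lista : List String), Dom_word_mixer word_lista → Spec_word_mixer word_lista (word_mixer word_lista)

-- ===== LEMMAS AND PROOFS =====

theorem pv_take_snoc (l : List String) (m k : Nat) (h : m + k < l.length) :
    (l.drop m).take (k + 1) = (l.drop m).take k ++ [l[m + k]] := by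
  rw [List.take_add_one, List.getElem?_drop, List.getElem?_eq_getElem h]
  rfl

theorem pv_take_cons (l : List String) (m s : Nat) (hm : m < l.length) :
    (l.drop m).take (s + 1) = l[m] :: (l.drop (m + 1)).take s := by
  rw [List.drop_eq_getElem_cons hm, List.take_succ_cons]

-- the refill loop moves exactly k = 5 - tail.length elements from the back of words[·:hi]
theorem wmRefill_eq (words : List String) :
    ∀ (k hi : Nat) (tail : List String), tail.length + k = 5 → k ≤ hi → hi ≤ words.length →
      wmRefill words hi tail = (hi - k, (words.drop (hi - k)).take k ++ tail) := by
  intro k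
  induction k with
  | zero =>
    intro hi tail h _ _
    unfold wmRefill
    rw [if_neg (by omega)]
    simp
  | succ k ih =>
    intro hi tail h hk hlen
    unfold wmRefill
    rw [if_pos ⟨by omega, by omega⟩]
    rw [ih (hi - 1) (words.getD (hi - 1) "" :: tail) (by simp; omega) (by omega) (by omega)]
    have hlt : hi - 1 < words.length := by omega
    have hgd : words.getD (hi - 1) "" = words[hi - 1] := List.getD_eq_getElem words "" hlt
    have h1 : hi - 1 - k = hi - (k + 1) := by omega
    have h2 : hi - (k + 1) + k = hi - 1 := by omega
    rw [hgd, h1]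
    refine Prod.ext rfl ?_
    rw [pv_take_snoc words (hi - (k + 1)) k (by omega)]
    simp [h2]

theorem pv_exists5 (l : List String) (h : l.length = 5) :
    ∃ a b c d e, l = [a, b, c, d, e] := by
  rcases l with _|⟨a,_|⟨b,_|⟨c,_|⟨d,_|⟨e,_|⟨f,t⟩⟩⟩⟩⟩⟩ <;> simp_all

-- Python pop(-5) on a list of length ≥ 5: removes and returns the 5th element from the end
theorem pv_pop_neg5 (pre : List String) (x : String) (post : List String) (h : post.length = 4) :
    PySem.List.pop? (pre ++ x :: post) (-5) = some (x, pre ++ post) := by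
  have hlen : (pre ++ x :: post).length = pre.length + 5 := by simp [h]
  unfold PySem.List.pop? PySem.List.pyIdx?
  rw [hlen]
  rw [if_neg (by omega), if_pos (by push_cast; omega)]
  have h5 : (-(-5:Int)).toNat = 5 := by decide
  have he : pre.length + 5 - 5 = pre.length := by omega
  rw [h5, he]
  simp [List.eraseIdx_append_of_length_le le_rfl]

-- one round of A's loop, on a current list written as first element + middle + last five
theorem wmLoopA_round (w : String) (m2 : List String) (t0 t1 t2 t3 t4 : String) (acc : List String) :
    wmLoopA ((w :: m2) ++ [t0, t1, t2, t3, t4]) acc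
      = wmLoopA (m2 ++ [t1, t2, t3]) (acc ++ [t0] ++ [w] ++ [t4]) := by
  have hp5 := pv_pop_neg5 (w :: m2) t0 [t1, t2, t3, t4] (by simp)
  have hp0 : PySem.List.pop? ((w :: m2) ++ [t1, t2, t3, t4]) 0
      = some (w, m2 ++ [t1, t2, t3, t4]) := by
    rw [List.cons_append, PySem.List.pop?_zero_cons]
  have hp1 : PySem.List.pop? (m2 ++ [t1, t2, t3, t4]) (-1)
      = some (t4, m2 ++ [t1, t2, t3]) := by
    have h : m2 ++ [t1, t2, t3, t4] = (m2 ++ [t1, t2, t3]) ++ [t4] := by simp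
    rw [h, PySem.List.pop?_last]
  rw [wmLoopA]
  rw [if_pos (by simp)]
  split
  · next heq => rw [hp5] at heq; cases heq
  · next a c1 heq =>
    obtain ⟨rfl, rfl⟩ : a = t0 ∧ c1 = (w :: m2) ++ [t1, t2, t3, t4] := by
      rw [hp5] at heq; simpa using heq.symm
    split
    · next heq0 => rw [hp0] at heq0; cases heq0
    · next b c2 heq0 =>
      obtain ⟨rfl, rfl⟩ : b = w ∧ c2 = m2 ++ [t1, t2, t3, t4] := by
        rw [hp0] at heq0; simpa using heq0.symm
      split
      · next heq1 => rw [hp1] at heq1; cases heq1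
      · next c c3 heq1 =>
        obtain ⟨rfl, rfl⟩ : c = t4 ∧ c3 = m2 ++ [t1, t2, t3] := by
          rw [hp1] at heq1; simpa using heq1.symm
        rfl

-- one round of B's loop, when the refill produces exactly five buffered words
theorem wmLoopB_round (words : List String) (lo hi hi' : Nat) (tail : List String)
    (t0 t1 t2 t3 t4 : String) (acc : List String)
    (hc : 5 < (hi - lo) + tail.length)
    (hr : wmRefill words hi tail = (hi', [t0, t1, t2, t3, t4])) :
    wmLoopB words lo hi tail acc
      = wmLoopB words (lo + 1) hi' [t1, t2, t3] (acc ++ [t0] ++ [words.getD lo ""] ++ [t4]) := by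
  rw [wmLoopB]
  rw [if_pos hc]
  split
  next h2 tl2 heq =>
    rw [hr] at heq
    obtain ⟨rfl, rfl⟩ : hi' = h2 ∧ [t0, t1, t2, t3, t4] = tl2 := by simpa using heq
    rfl

-- main invariant: A's current list is words[lo:hi] ++ tail, with tail the buffered back
theorem loop_eq (words : List String) :
    ∀ (N lo hi : Nat) (tail acc : List String),
      (hi - lo) + tail.length ≤ N → lo ≤ hi → hi ≤ words.length → tail.length ≤ 5 →
      wmLoopA ((words.drop lo).take (hi - lo) ++ tail) acc = wmLoopB words lo hi tail acc := by
  intro N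
  induction N with
  | zero =>
    intro lo hi tail acc hN hlh hhl ht5
    rw [wmLoopA, wmLoopB]
    rw [if_neg (by simp; omega), if_neg (by omega)]
  | succ N ih =>
    intro lo hi tail acc hN hlh hhl ht5
    by_cases hc : 5 < (hi - lo) + tail.length
    · -- one round of each loop, then the induction hypothesis
      set k := 5 - tail.length with hkdef
      have hk1 : k + 1 ≤ hi - lo := by omega
      have hrefill := wmRefill_eq words k hi tail (by omega) (by omega) hhl
      set hi' := hi - k with hi'def
      set T := (words.drop hi').take k ++ tail with hTdef
      have hTlen : T.length = 5 := by rw [hTdef]; simp; omega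
      obtain ⟨t0, t1, t2, t3, t4, hT5⟩ := pv_exists5 T hTlen
      rw [hT5] at hrefill
      have hsplit : (words.drop lo).take (hi - lo)
          = (words.drop lo).take (hi' - lo) ++ (words.drop hi').take k := by
        have hha : hi - lo = (hi' - lo) + k := by omega
        rw [hha, List.take_add, List.drop_drop]
        have : lo + (hi' - lo) = hi' := by omega
        rw [this]
      have hlo : lo < words.length := by omega
      have hs1 : hi' - lo = (hi' - lo - 1) + 1 := by omega
      set s := hi' - lo - 1 with hsdef
      set m2 := (words.drop (lo + 1)).take s with hm2def
      have hmid' : (words.drop lo).take (hi' - lo) = words[lo] :: m2 := by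
        rw [hs1, pv_take_cons words lo s hlo]
      have hcur : (words.drop lo).take (hi - lo) ++ tail
          = (words[lo] :: m2) ++ [t0, t1, t2, t3, t4] := by
        rw [hsplit, hmid', List.append_assoc, ← hTdef, hT5]
      rw [hcur, wmLoopA_round]
      rw [wmLoopB_round words lo hi hi' tail t0 t1 t2 t3 t4 acc hc hrefill]
      have hgdlo : words.getD lo "" = words[lo] := List.getD_eq_getElem words "" hlo
      rw [hgdlo]
      have hm2eq : m2 = (words.drop (lo + 1)).take (hi' - (lo + 1)) := by
        rw [hm2def]
        have : hi' - (lo + 1) = s := by omega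
        rw [this]
      rw [hm2eq]
      exact ih (lo + 1) hi' [t1, t2, t3] _ (by simp; omega) (by omega) (by omega) (by simp)
    · rw [wmLoopA, wmLoopB]
      rw [if_neg (by simp; omega), if_neg (by omega)]

-- ===== VERDICT (by name: the statement is the Claim_ definition above) =====
theorem word_mixer_spec : Claim_equal_word_mixer := by
  intro ws _
  unfold Spec_word_mixer word_mixer word_mixer_alt
  have hfull : ((PySem.List.sorted ws (fun x => x) false).drop 0).take
      ((PySem.List.sorted ws (fun x => x) false).length - 0) ++ ([] : List String)
      = PySem.List.sorted ws (fun x => x) false := by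
    simp
  have := loop_eq (PySem.List.sorted ws (fun x => x) false)
    (PySem.List.sorted ws (fun x => x) false).length 0
    (PySem.List.sorted ws (fun x => x) false).length [] []
    (by simp) (by omega) le_rfl (by simp)
  rw [hfull] at this
  exact this
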